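-- pv_equiv track=rewrite | github.com/Madhan-Bharathan/MyPython-scripts | odd&evenShuffling/odd&evenShuffling.py | shuffling
-- ===== SOURCE A (Python) =====
-- def shuffling(word,punct,j,new_word):
--   # Making sure If word length > 3
--   if len(word) > 3:
--
--     # Checking if the word ends with punctuation
--     if word.endswith(punct):
--       word1 = word[1:-2]
--
--       # Shuffling even characters
--       if j%2==0:
--         i=0
--       # Shuffling odd characters
--       else:
--         i=1
--       list1=[]
--       list1[:0]=word1
--       while i<len(word1) and i+2<len(word1):
--         temp=list1[i]
--         list1[i]=list1[i+2]
--         list1[i+2]=temp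
--         i=i+4
--       list1.insert(0, word[0])
--       list1.append(word[-2])
--       list1.append(word[-1])
--     else:
--       word1= word[1:-1]
--       # Shuffling even characters
--       if j%2==0:
--         i=0
--       else:
--       # Shuffling the odd characters
--         i=1
--       list1=[]
--       list1[:0]=word1
--       while i<len(word1) and i+2<len(word1):
--         temp=list1[i]
--         list1[i]=list1[i+2]
--         list1[i+2]=temp
--         i=i+4
--       list1.insert(0, word[0])
--       list1.append(word[-1])
--     new_word = new_word + ''.join(list1) + " "
--   # If the word length < 3 directly append the word
--   else:
--     new_word = new_word + word + " "
--   return new_word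
-- ===== SOURCE B (Python) =====
-- def shuffling(word, punct, j, new_word):
--     if len(word) <= 3:
--         return new_word + word + " "
--     if word.endswith(punct):
--         inner, tail = word[1:-2], word[-2:]
--     else:
--         inner, tail = word[1:-1], word[-1]
--     off = j % 2
--     n = len(inner)
--     shuffled = ''.join(
--         inner[p + 2] if (p - off) % 4 == 0 and p + 2 < n
--         else inner[p - 2] if (p - off) % 4 == 2
--         else inner[p]
--         for p in range(n)
--     )
--     return new_word + word[0] + shuffled + tail + " "
-- ===== Notes on version B (the rewrite author's own statement) =====
-- stated objective: alternative
-- what changed: B replaces A's in-place list with swap-in-a-while-loop by directly computing the shuffled inner string with a per-index remapping ((p-off)%4 decides whether position p takes the char from p+2, p-2 or p), joining it between word[0] and the kept tail.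
import Mathlib
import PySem

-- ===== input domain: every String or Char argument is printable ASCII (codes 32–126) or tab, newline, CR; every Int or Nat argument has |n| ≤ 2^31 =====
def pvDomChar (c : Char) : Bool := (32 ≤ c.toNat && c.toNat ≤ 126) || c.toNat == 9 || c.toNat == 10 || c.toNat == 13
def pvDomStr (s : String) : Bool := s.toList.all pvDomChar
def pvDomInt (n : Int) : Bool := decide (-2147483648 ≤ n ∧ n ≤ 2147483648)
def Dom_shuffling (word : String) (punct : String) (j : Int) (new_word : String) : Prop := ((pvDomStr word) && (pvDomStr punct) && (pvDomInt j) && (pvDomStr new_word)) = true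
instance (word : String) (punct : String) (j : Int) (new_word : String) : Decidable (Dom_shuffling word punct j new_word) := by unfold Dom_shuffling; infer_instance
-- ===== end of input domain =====

-- B replaces A's in-place swap loop by a per-index remapping of the inner substring (alternative decomposition, same cost).

-- ===== PORT A =====
-- temp = list1[i]; list1[i] = list1[i+2]; list1[i+2] = temp  (indices in range under the loop guard)
def pvSwap (l : List Char) (i : Nat) : List Char :=
  let temp := l.getD i ' '
  (l.set i (l.getD (i+2) ' ')).set (i+2) temp

-- while i < len(word1) and i+2 < len(word1): swap; i = i + 4   (i is a non-negative Python int)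
def pvLoopA (l : List Char) (i : Nat) : List Char :=
  if i < l.length ∧ i + 2 < l.length then
    pvLoopA (pvSwap l i) (i + 4)
  else l
termination_by l.length - i
decreasing_by simp [pvSwap]; omega

def shuffling (word : String) (punct : String) (j : Int) (new_word : String) : String :=
  let w := word.toList
  if 3 < w.length then
    if PySem.Str.endswith word punct then
      let word1 := PySem.List.slice w (some 1) (some (-2))
      let i : Nat := if PySem.Int.mod j 2 = 0 then 0 else 1
      let list1 := pvLoopA word1 i
      let list1 := PySem.List.insert list1 0 (PySem.List.pyGetD w 0 ' ')
      let list1 := list1 ++ [PySem.List.pyGetD w (-2) ' ']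
      let list1 := list1 ++ [PySem.List.pyGetD w (-1) ' ']
      String.ofList (new_word.toList ++ list1 ++ [' '])
    else
      let word1 := PySem.List.slice w (some 1) (some (-1))
      let i : Nat := if PySem.Int.mod j 2 = 0 then 0 else 1
      let list1 := pvLoopA word1 i
      let list1 := PySem.List.insert list1 0 (PySem.List.pyGetD w 0 ' ')
      let list1 := list1 ++ [PySem.List.pyGetD w (-1) ' ']
      String.ofList (new_word.toList ++ list1 ++ [' '])
  else
    String.ofList (new_word.toList ++ w ++ [' '])

-- ===== PORT B =====
-- ''.join(inner[p+2] if (p-off)%4==0 and p+2<n else inner[p-2] if (p-off)%4==2 else inner[p] for p in range(n))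
-- (off = j%2 ∈ {0,1}, so when (p-off)%4==2 Python's p-2 is ≥ 0 and Nat subtraction is exact there)
def pvShufB (inner : List Char) (off : Int) : List Char :=
  let n := inner.length
  (List.range n).map (fun (p : Nat) =>
    if PySem.Int.mod ((p : Int) - off) 4 = 0 ∧ p + 2 < n then inner.getD (p+2) ' '
    else if PySem.Int.mod ((p : Int) - off) 4 = 2 then inner.getD (p-2) ' '
    else inner.getD p ' ')

def shuffling_alt (word : String) (punct : String) (j : Int) (new_word : String) : String :=
  let w := word.toList
  if w.length ≤ 3 then
    String.ofList (new_word.toList ++ w ++ [' '])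
  else
    let it :=
      if PySem.Str.endswith word punct then
        (PySem.List.slice w (some 1) (some (-2)), PySem.List.slice w (some (-2)) none)
      else
        (PySem.List.slice w (some 1) (some (-1)), [PySem.List.pyGetD w (-1) ' '])
    let off := PySem.Int.mod j 2
    let shuffled := pvShufB it.1 off
    String.ofList (new_word.toList ++ [PySem.List.pyGetD w 0 ' '] ++ shuffled ++ it.2 ++ [' '])

-- ===== PRECONDITION & SPEC =====
def Spec_shuffling (word : String) (punct : String) (j : Int) (new_word : String) (out : String) : Prop := out = shuffling_alt word punct j new_word
instance (word : String) (punct : String) (j : Int) (new_word : String) (out : String) : Decidable (Spec_shuffling word punct j new_word out) := by unfold Spec_shuffling; infer_instance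

-- ===== CLAIM (what is proved, stated in full; the proofs are below) =====
def Claim_equal_shuffling : Prop := ∀ (word : String) (punct : String) (j : Int) (new_word : String), Dom_shuffling word punct j new_word → Spec_shuffling word punct j new_word (shuffling word punct j new_word)

-- ===== LEMMAS AND PROOFS =====

lemma getD_pvSwap (l : List Char) (i q : Nat) (h : i + 2 < l.length) :
    (pvSwap l i).getD q ' ' =
      if q = i then l.getD (i+2) ' ' else if q = i + 2 then l.getD i ' ' else l.getD q ' ' := by
  have hi : i < l.length := by omega
  simp only [pvSwap]
  by_cases h2 : q = i + 2
  · subst h2; rw [if_neg (by omega), if_pos rfl]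
    rw [List.getD_eq_getElem?_getD, List.getElem?_set]
    simp [hi, h, List.getD_eq_getElem?_getD]
  · rw [List.getD_eq_getElem?_getD, List.getElem?_set, if_neg (Ne.symm h2)]
    by_cases h1 : q = i
    · subst h1
      rw [List.getD_eq_getElem?_getD, List.getElem?_set, if_pos rfl, if_pos hi]
      simp
    · rw [if_neg h1, if_neg h2, List.getElem?_set, if_neg (Ne.symm h1),
        List.getD_eq_getElem?_getD]

-- A's swap loop computes, for each position p of the original list, the remapped character.
lemma pvLoopA_spec (l : List Char) (i : Nat) :
    pvLoopA l i = (List.range l.length).map (fun p =>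
      if i ≤ p ∧ (p - i) % 4 = 0 ∧ p + 2 < l.length then l.getD (p+2) ' '
      else if i + 2 ≤ p ∧ (p - i) % 4 = 2 then l.getD (p-2) ' '
      else l.getD p ' ') := by
  induction l, i using pvLoopA.induct with
  | case1 l i h ih =>
    rw [pvLoopA, if_pos h]
    have hlen : (pvSwap l i).length = l.length := by simp [pvSwap]
    rw [ih, hlen]
    apply List.map_congr_left
    intro p hp
    simp only [List.mem_range] at hp
    rw [getD_pvSwap l i (p+2) h.2, getD_pvSwap l i p h.2, getD_pvSwap l i (p-2) h.2]
    split_ifs <;> first | rfl | omega | (congr 1; omega)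
  | case2 l i h =>
    rw [pvLoopA, if_neg h]
    have hgt : ∀ p, p < l.length →
        (if i ≤ p ∧ (p - i) % 4 = 0 ∧ p + 2 < l.length then l.getD (p+2) ' '
         else if i + 2 ≤ p ∧ (p - i) % 4 = 2 then l.getD (p-2) ' '
         else l.getD p ' ') = l.getD p ' ' := by
      intro p hp
      rw [if_neg (by omega), if_neg (by omega)]
    rw [List.map_congr_left (fun p hp => hgt p (List.mem_range.mp hp))]
    apply List.ext_getElem (by simp)
    intro k h1 h2
    simp only [List.getElem_map, List.getElem_range, List.getD_eq_getElem?_getD,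
      List.getElem?_eq_getElem (by simpa using h2), Option.getD_some]

lemma pv_mod_sub (p o : Nat) (hop : o ≤ p) :
    PySem.Int.mod ((p : Int) - (o : Int)) 4 = (((p - o) % 4 : Nat) : Int) := by
  have h : (p : Int) - (o : Int) = ((p - o : Nat) : Int) := by omega
  rw [h]
  exact_mod_cast PySem.Int.mod_natCast (p - o) 4

-- A's loop started at offset j%2 equals B's per-index remap.
lemma pvLoopA_eq_pvShufB (l : List Char) (off : Int) (hoff : off = 0 ∨ off = 1) :
    pvLoopA l off.toNat = pvShufB l off := by
  rw [pvLoopA_spec, pvShufB]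
  apply List.map_congr_left
  intro p hp
  simp only [List.mem_range] at hp
  rcases hoff with h | h <;> subst h
  · have hm := pv_mod_sub p 0 (by omega)
    simp only [Nat.cast_zero] at hm
    rw [hm]
    simp only [Int.toNat_zero, Nat.sub_zero] at *
    split_ifs <;> first | rfl | omega
  · rcases p with _ | q
    · have hm : PySem.Int.mod ((0 : Int) - 1) 4 = 3 := by decide
      simp only [Nat.cast_zero, hm, Int.toNat_one]
      rw [if_neg (by omega), if_neg (by omega), if_neg (by omega), if_neg (by omega)]
    · have hm := pv_mod_sub (q + 1) 1 (by omega)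
      have hc : ((q + 1 : Nat) : Int) - (1 : Int) = ((q + 1 : Nat) : Int) - ((1 : Nat) : Int) := by
        norm_num
      rw [hc, hm]
      simp only [Int.toNat_one, Nat.add_sub_cancel]
      split_ifs <;> first | rfl | omega

-- word[-2:] of a word of length ≥ 4 is its last two characters.
lemma pv_tail_two (w : List Char) (h : 3 < w.length) :
    PySem.List.slice w (some (-2)) none =
      [PySem.List.pyGetD w (-2) ' ', PySem.List.pyGetD w (-1) ' '] := by
  rw [PySem.List.slice_from_neg_ofNat w 2 (by omega),
      PySem.List.pyGetD_neg_ofNat w 2 ' ' (by omega) (by omega),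
      PySem.List.pyGetD_neg_ofNat w 1 ' ' (by omega) (by omega)]
  rw [List.drop_eq_getElem_cons (by omega), List.drop_eq_getElem_cons (by omega)]
  rw [List.drop_eq_nil_of_le (by omega)]
  have h2 : w.length - 2 + 1 = w.length - 1 := by omega
  simp [h2]

lemma pv_mod2_cases (j : Int) : PySem.Int.mod j 2 = 0 ∨ PySem.Int.mod j 2 = 1 := by
  have h1 := PySem.Int.mod_nonneg j (b := 2) (by omega)
  have h2 := PySem.Int.mod_lt j (b := 2) (by omega)
  omega

-- ===== VERDICT (by name: the statement is the Claim_ definition above) =====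
theorem shuffling_spec : Claim_equal_shuffling := by
  unfold Claim_equal_shuffling
  intro word punct j new_word _
  unfold Spec_shuffling
  simp only [shuffling, shuffling_alt]
  by_cases hlen : 3 < word.toList.length
  · rw [if_pos hlen, if_neg (show ¬(word.toList.length ≤ 3) from by omega)]
    have hmod := pv_mod2_cases j
    have hi : (if PySem.Int.mod j 2 = 0 then (0 : Nat) else 1) = (PySem.Int.mod j 2).toNat := by
      rcases hmod with h | h
      · rw [if_pos h, h]; rfl
      · rw [if_neg (by rw [h]; omega), h]; rfl
    by_cases hend : PySem.Str.endswith word punct = true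
    · rw [if_pos hend, if_pos hend]
      rw [hi, pvLoopA_eq_pvShufB _ _ hmod, pv_tail_two word.toList hlen, PySem.List.insert_zero]
      congr 1
      simp
    · rw [if_neg hend, if_neg hend]
      rw [hi, pvLoopA_eq_pvShufB _ _ hmod, PySem.List.insert_zero]
      congr 1
      simp
  · rw [if_neg hlen, if_pos (show word.toList.length ≤ 3 from by omega)]
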